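-- pv_equiv track=rewrite | github.com/Kenneth-Macharia/Learning | Python/exercises/abs_learning_tasks/valid_chess_board.py | is_valid_chess_board
-- ===== SOURCE A (Python) =====
-- def is_valid_chess_board(moves_dict):
--     ''' Checks if chess moves passed in as a dictionary are legal chess moves
--     '''
--
--     valid = False
--
--     # Create valid chess board layout
--     chess_board = {}
--     for col in range(ord('a'), ord('i')):  # The column letter a - h
--         for row in range(1, 9):  # The row numbers 1 - 8
--             chess_board[str(row)+chr(col)] = ''
--
--     # Create the valid pieces
--     piece_types = ['Rook', 'Knight', 'Bishop', 'King', 'Queen', 'Pawn']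
--     piece_colors = ['w', 'b']
--
--     all_chess_piece_types = []
--
--     for color in piece_colors:
--         for piece in piece_types:
--             all_chess_piece_types.append(f'{color}-{piece}')
--
--     # Check if moves parameter dict is valid
--     move_sequence = []
--     for move, piece in moves_dict.items():
--         if move in chess_board:
--             if piece in all_chess_piece_types:
--                 move_sequence.append(piece[0])
--             else:
--                 break
--         else:
--             break
--
--     if len(move_sequence) == len(moves_dict):
--         for i in range(len(move_sequence) - 1):
--             if move_sequence[i] != move_sequence[i + 1]:
--                 valid = True
--             else:
--                 valid = False
--                 break
--
--     return valid
-- ===== SOURCE B (Python) =====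
-- def is_valid_chess_board(moves_dict):
--     ''' Single pass: validate each move/piece and track color alternation on the fly
--         (no intermediate move_sequence list, no separate adjacent-pair rescan). '''
--     cells = {str(row) + col for col in 'abcdefgh' for row in range(1, 9)}
--     pieces = {f'{color}-{kind}' for color in 'wb'
--               for kind in ('Rook', 'Knight', 'Bishop', 'King', 'Queen', 'Pawn')}
--     alternating = True
--     prev = None
--     count = 0
--     for move, piece in moves_dict.items():
--         if move not in cells or piece not in pieces:
--             return False
--         color = piece[0]
--         if color == prev:
--             alternating = False
--         prev = color
--         count += 1
--     return count >= 2 and alternating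
-- ===== Notes on version B (the rewrite author's own statement) =====
-- stated objective: simpler
-- what changed: B replaces A's two-phase scheme (build an intermediate move_sequence list plus a length check, then rescan its adjacent pairs by index) with one fused pass over the items that validates each entry with early return and tracks the previous color, an alternation flag and a count on the fly.
import Mathlib
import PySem

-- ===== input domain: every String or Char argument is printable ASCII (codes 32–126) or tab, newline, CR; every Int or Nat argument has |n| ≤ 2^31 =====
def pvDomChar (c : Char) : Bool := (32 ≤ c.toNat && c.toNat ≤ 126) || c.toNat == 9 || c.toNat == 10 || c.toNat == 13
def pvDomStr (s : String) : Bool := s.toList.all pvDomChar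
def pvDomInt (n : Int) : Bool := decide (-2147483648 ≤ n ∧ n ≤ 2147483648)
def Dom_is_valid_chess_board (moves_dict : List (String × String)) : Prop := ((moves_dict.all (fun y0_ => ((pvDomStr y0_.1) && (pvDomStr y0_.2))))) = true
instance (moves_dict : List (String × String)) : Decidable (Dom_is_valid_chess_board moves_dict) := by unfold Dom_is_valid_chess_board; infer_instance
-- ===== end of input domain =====

-- B fuses A's validation pass (with its intermediate move_sequence list) and A's separate
-- adjacent-pair rescan into one loop with an alternation flag (objective: simpler; same cost).
-- moves_dict is a Python dict: both ports read it through PySem.Dict.ofList, so duplicate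
-- keys collapse exactly as Python's dict construction does.

-- ===== PORT A =====
-- chess_board = {}; for col in range(ord('a'), ord('i')): for row in range(1, 9): chess_board[str(row)+chr(col)] = ''
def pvChessBoardA : PySem.Dict String String :=
  (PySem.List.pyRange 97 105 1).foldl (fun d col =>
    (PySem.List.pyRange 1 9 1).foldl (fun d row =>
      d.insert (PySem.Int.toStr row ++ String.ofList [Char.ofNat col.toNat]) "") d)
    PySem.Dict.empty

-- all_chess_piece_types built by the nested append loop; f'{color}-{piece}' = color ++ "-" ++ piece
def pvPiecesA : List String :=
  ["w", "b"].foldl (fun acc color =>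
    ["Rook", "Knight", "Bishop", "King", "Queen", "Pawn"].foldl
      (fun acc piece => acc ++ [color ++ "-" ++ piece]) acc) []

-- the move_sequence loop: append piece[0] while valid; break (stop) at the first invalid entry
def pvSeqA : List (String × String) → List (Option Char)
  | [] => []
  | (move, piece) :: rest =>
    if pvChessBoardA.contains move then
      if pvPiecesA.contains piece then
        PySem.Str.pyGet? piece 0 :: pvSeqA rest
      else []
    else []

-- for i in range(len(seq)-1): if seq[i] != seq[i+1]: valid = True else: valid = False; break
-- (the indexed loop reads adjacent pairs left to right; ported as the same walk, break = false)
def pvAltLoopA (valid : Bool) : List (Option Char) → Bool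
  | a :: b :: rest => if a ≠ b then pvAltLoopA true (b :: rest) else false
  | _ => valid

def is_valid_chess_board (moves_dict : List (String × String)) : Bool :=
  let items := (PySem.Dict.ofList moves_dict).items
  let seq := pvSeqA items
  if seq.length = items.length then pvAltLoopA false seq else false

-- ===== PORT B =====
-- cells = {str(row) + col for col in 'abcdefgh' for row in range(1, 9)}  (used only for membership)
def pvCellsB : PySem.Set String :=
  PySem.Set.ofList ("abcdefgh".toList.flatMap (fun col =>
    (PySem.List.pyRange 1 9 1).map (fun row => PySem.Int.toStr row ++ String.ofList [col])))

-- pieces = {f'{color}-{kind}' for color in 'wb' for kind in (...)}  (used only for membership)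
def pvPiecesB : PySem.Set String :=
  PySem.Set.ofList ("wb".toList.flatMap (fun color =>
    (["Rook", "Knight", "Bishop", "King", "Queen", "Pawn"]).map
      (fun kind => String.ofList [color] ++ "-" ++ kind)))

-- B's single for-loop; prev : Option (Option Char), none = Python's None; early return False
def pvGoB (prev : Option (Option Char)) (count : Int) (alt : Bool) :
    List (String × String) → Bool
  | [] => decide (2 ≤ count) && alt
  | (move, piece) :: rest =>
    if !(pvCellsB.contains move) || !(pvPiecesB.contains piece) then false
    else
      let color := PySem.Str.pyGet? piece 0
      pvGoB (some color) (count + 1) (if some color = prev then false else alt) rest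

def is_valid_chess_board_alt (moves_dict : List (String × String)) : Bool :=
  pvGoB none 0 true (PySem.Dict.ofList moves_dict).items

-- ===== PRECONDITION & SPEC =====
def Spec_is_valid_chess_board (moves_dict : List (String × String)) (out : Bool) : Prop := out = is_valid_chess_board_alt moves_dict
instance (moves_dict : List (String × String)) (out : Bool) : Decidable (Spec_is_valid_chess_board moves_dict out) := by unfold Spec_is_valid_chess_board; infer_instance

-- ===== CLAIM (what is proved, stated in full; the proofs are below) =====
def Claim_equal_is_valid_chess_board : Prop := ∀ (moves_dict : List (String × String)), Dom_is_valid_chess_board moves_dict → Spec_is_valid_chess_board moves_dict (is_valid_chess_board moves_dict)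

-- ===== LEMMAS AND PROOFS =====

set_option maxRecDepth 4096 in
theorem hk : pvChessBoardA.keys = (pvCellsB : List String) := by decide
theorem pv_contains_cells (m : String) :
    pvChessBoardA.contains m = pvCellsB.contains m := by
  rw [PySem.Dict.contains_eq_decide_mem_keys, hk]
  simp [PySem.Set.contains]

set_option maxRecDepth 4096 in
theorem hp : pvPiecesA = (pvPiecesB : List String) := by decide
theorem pv_contains_pieces (p : String) :
    pvPiecesA.contains p = pvPiecesB.contains p := by
  rw [hp]; rfl

def pvVal (e : String × String) : Bool :=
  pvCellsB.contains e.1 && pvPiecesB.contains e.2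
def pvCol (e : String × String) : Option Char := PySem.Str.pyGet? e.2 0
def pvChainAdj : List (Option Char) → Bool
  | a :: b :: rest => !(decide (a = b)) && pvChainAdj (b :: rest)
  | _ => true
def pvChain (prev : Option (Option Char)) : List (Option Char) → Bool
  | [] => true
  | c :: cs => !(decide (some c = prev)) && pvChain (some c) cs

theorem pvSeqA_all (l : List (String × String)) (h : l.all pvVal = true) :
    pvSeqA l = l.map pvCol := by
  induction l with
  | nil => rfl
  | cons e rest ih =>
    obtain ⟨m, p⟩ := e
    simp only [List.all_cons, Bool.and_eq_true, pvVal] at h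
    obtain ⟨⟨h1, h2⟩, h3⟩ := h
    have ha1 : pvChessBoardA.contains m = true := by rw [pv_contains_cells]; exact h1
    have ha2 : pvPiecesA.contains p = true := by rw [pv_contains_pieces]; exact h2
    simp only [pvSeqA, ha1, ha2, if_true, List.map_cons, ih h3]
    rfl

theorem pvSeqA_not_all (l : List (String × String)) (h : l.all pvVal = false) :
    (pvSeqA l).length ≠ l.length := by
  induction l with
  | nil => simp at h
  | cons e rest ih =>
    obtain ⟨m, p⟩ := e
    simp only [List.all_cons, Bool.and_eq_false_iff, pvVal] at h
    by_cases h1 : pvCellsB.contains m = true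
    case neg =>
      have ha1 : pvChessBoardA.contains m = false := by
        rw [pv_contains_cells]; exact Bool.eq_false_iff.mpr h1
      simp [pvSeqA, ha1]
    case pos =>
      have ha1 : pvChessBoardA.contains m = true := by rw [pv_contains_cells]; exact h1
      by_cases h2 : pvPiecesB.contains p = true
      case neg =>
        have ha2 : pvPiecesA.contains p = false := by
          rw [pv_contains_pieces]; exact Bool.eq_false_iff.mpr h2
        simp only [pvSeqA, ha1, ha2, Bool.false_eq_true, if_true, if_false,
          List.length_nil, List.length_cons]
        omega
      case pos =>
        have ha2 : pvPiecesA.contains p = true := by rw [pv_contains_pieces]; exact h2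
        have h3 : rest.all pvVal = false := by
          rcases h with (h | h) | h
          · rw [h1] at h; simp at h
          · rw [h2] at h; simp at h
          · exact h
        simp only [pvSeqA, ha1, ha2, if_true, List.length_cons]
        exact fun hc => ih h3 (by omega)

theorem pvAltLoopA_true (cs : List (Option Char)) :
    pvAltLoopA true cs = pvChainAdj cs := by
  induction cs with
  | nil => rfl
  | cons a rest ih =>
    cases rest with
    | nil => rfl
    | cons b r =>
      by_cases hab : a = b
      · simp [pvAltLoopA, pvChainAdj, hab]
      · simp [pvAltLoopA, pvChainAdj, hab, ih]

theorem pvAltLoopA_false (cs : List (Option Char)) :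
    pvAltLoopA false cs = (decide (2 ≤ cs.length) && pvChainAdj cs) := by
  match cs with
  | [] => rfl
  | [a] => simp [pvAltLoopA, pvChainAdj]
  | a :: b :: r =>
    by_cases hab : a = b
    · simp [pvAltLoopA, pvChainAdj, hab]
    · simp [pvAltLoopA, pvChainAdj, hab, pvAltLoopA_true]

theorem pvChain_some (cs : List (Option Char)) (a : Option Char) :
    pvChain (some a) cs = pvChainAdj (a :: cs) := by
  induction cs generalizing a with
  | nil => rfl
  | cons b r ih =>
    simp only [pvChain, pvChainAdj, ih]
    congr 1
    simp [eq_comm]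

theorem pvChain_none (cs : List (Option Char)) :
    pvChain none cs = pvChainAdj cs := by
  cases cs with
  | nil => rfl
  | cons a r => simp [pvChain, pvChain_some]

set_option maxRecDepth 8192 in
theorem pvGoB_spec (l : List (String × String)) (prev : Option (Option Char))
    (count : Int) (alt : Bool) :
    pvGoB prev count alt l =
      if l.all pvVal then
        decide (2 ≤ count + (l.length : Int)) && (alt && pvChain prev (l.map pvCol))
      else false := by
  induction l generalizing prev count alt with
  | nil => simp [pvGoB, pvChain]
  | cons e rest ih =>
    obtain ⟨m, p⟩ := e
    by_cases h1 : pvCellsB.contains m = true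
    case neg =>
      have h1' := Bool.eq_false_iff.mpr h1
      simp only [pvGoB, h1', Bool.not_false, Bool.true_or, if_true, List.all_cons,
        pvVal, Bool.false_and, Bool.false_eq_true, if_false]
    case pos =>
      by_cases h2 : pvPiecesB.contains p = true
      case neg =>
        have h2' := Bool.eq_false_iff.mpr h2
        simp only [pvGoB, h1, h2', Bool.not_true, Bool.not_false, Bool.or_true,
          if_true, List.all_cons, pvVal, Bool.and_false,
          Bool.false_and, Bool.false_eq_true, if_false]
      case pos =>
        by_cases hrest : rest.all pvVal = true
        · simp [pvGoB, ih, pvVal, hrest, pvChain, pvCol]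
          have h4 : count + 1 + (rest.length : Int) = count + ((rest.length : Int) + 1) := by
            ring
          rw [h4]
          ac_rfl
        · have hrest' := Bool.eq_false_iff.mpr hrest
          simp only [pvGoB, h1, h2, Bool.not_true, Bool.or_self, if_false, ih,
            List.all_cons, pvVal, Bool.and_self, hrest', Bool.and_false,
            Bool.false_eq_true, if_false]

theorem pv_main (l : List (String × String)) :
    (if (pvSeqA l).length = l.length then pvAltLoopA false (pvSeqA l) else false) =
      pvGoB none 0 true l := by
  rw [pvGoB_spec]
  by_cases h : l.all pvVal = true
  · rw [pvSeqA_all l h, h, if_pos (by simp)]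
    rw [pvAltLoopA_false, pvChain_none]
    simp only [List.length_map, Bool.true_and]
    congr 1
    simp
  · rw [if_neg (pvSeqA_not_all l (by simpa using h)), eq_false_of_ne_true h, if_neg (by simp)]

-- ===== VERDICT (by name: the statement is the Claim_ definition above) =====
theorem is_valid_chess_board_spec : Claim_equal_is_valid_chess_board := by
  intro md _
  unfold Spec_is_valid_chess_board is_valid_chess_board is_valid_chess_board_alt
  exact pv_main _
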